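-- pv_equiv track=rewrite | github.com/intelligence-csd-auth-gr/keyphrase-extraction-via-summarization | data_statistics/trainset_statistics_fullabstract.py | remove_brackets_and_contents
-- ===== SOURCE A (Python) =====
-- def remove_brackets_and_contents(doc):
--     """
--     remove parenthesis, brackets and their contents
--     :param doc: initial text document
--     :return: text document without parenthesis, brackets and their contents
--     """
--     ret = ''
--     skip1c = 0
--     # skip2c = 0
--     for i in doc:
--         if i == '[':
--             skip1c += 1
--         # elif i == '(':
--             # skip2c += 1
--         elif i == ']' and skip1c > 0:
--             skip1c -= 1
--         # elif i == ')'and skip2c > 0: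
--             # skip2c -= 1
--         elif skip1c == 0:  # and skip2c == 0:
--             ret += i
--     return ret
-- ===== SOURCE B (Python) =====
-- def remove_brackets_and_contents(doc):
--     out = []
--     i = 0
--     n = len(doc)
--     while i < n:
--         c = doc[i]
--         if c == '[':
--             depth = 1
--             i += 1
--             while i < n and depth:
--                 if doc[i] == '[':
--                     depth += 1
--                 elif doc[i] == ']':
--                     depth -= 1
--                 i += 1
--         else:
--             out.append(c)
--             i += 1
--     return ''.join(out)
-- ===== Notes on version B (the rewrite author's own statement) =====
-- stated objective: alternative
-- what changed: Replaces A's single-pass state machine (a persistent depth counter threaded through every character, with an output-append branch guarded by depth==0) by a recursive-descent/nested-loop scan: an outer loop that copies characters until it meets '[', and an inner group-skipping loop that consumes the whole bracketed group (tracking nesting only while inside it); a stray ']' at depth 0 is copied like any character and an unclosed '[' consumes the rest of the string, matching A.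
import Mathlib
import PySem

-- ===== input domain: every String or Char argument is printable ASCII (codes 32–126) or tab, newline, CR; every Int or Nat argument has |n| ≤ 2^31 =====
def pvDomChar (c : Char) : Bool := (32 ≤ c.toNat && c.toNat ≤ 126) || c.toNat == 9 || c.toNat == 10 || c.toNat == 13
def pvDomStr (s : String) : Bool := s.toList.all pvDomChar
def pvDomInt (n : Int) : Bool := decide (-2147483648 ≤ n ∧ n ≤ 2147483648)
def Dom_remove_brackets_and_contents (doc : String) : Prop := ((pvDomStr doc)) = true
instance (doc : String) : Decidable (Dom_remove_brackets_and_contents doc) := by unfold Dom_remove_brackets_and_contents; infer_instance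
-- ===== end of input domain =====

-- B replaces A's single state-machine fold (global depth counter) by an outer copy loop
-- with a separate nested group-skipping loop; objective: alternative decomposition.


-- ===== PORT A =====
-- literal port of A: fold over the characters with state (ret, skip1c)
def remove_brackets_and_contents (doc : String) : String :=
  String.mk (doc.toList.foldl (fun (st : List Char × Int) i =>
    if i = '[' then (st.1, st.2 + 1)
    else if i = ']' ∧ st.2 > 0 then (st.1, st.2 - 1)
    else if st.2 = 0 then (st.1 ++ [i], st.2)
    else st) ([], 0)).1

-- ===== PORT B =====
-- inner while: consume characters while depth is nonzero, adjusting depth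
def pvSkipGroup : List Char → Int → List Char
  | [], _ => []
  | c :: cs, d =>
    if d = 0 then c :: cs
    else pvSkipGroup cs (if c = '[' then d + 1 else if c = ']' then d - 1 else d)

theorem pvSkipGroup_length : ∀ (l : List Char) (d : Int), (pvSkipGroup l d).length ≤ l.length := by
  intro l
  induction l with
  | nil => intro d; simp [pvSkipGroup]
  | cons c cs ih =>
    intro d
    simp only [pvSkipGroup]
    split_ifs <;> first | exact le_rfl | exact Nat.le_succ_of_le (ih _)

-- outer while: copy characters, skipping whole bracket groups
def pvCopyOutside : List Char → List Char
  | [] => []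
  | c :: cs =>
    if c = '[' then pvCopyOutside (pvSkipGroup cs 1)
    else c :: pvCopyOutside cs
termination_by l => l.length
decreasing_by
  all_goals simp only [List.length_cons]
  · exact Nat.lt_succ_of_le (pvSkipGroup_length cs 1)
  · omega

def remove_brackets_and_contents_alt (doc : String) : String :=
  String.mk (pvCopyOutside doc.toList)

-- ===== PRECONDITION & SPEC =====
def Spec_remove_brackets_and_contents (doc : String) (out : String) : Prop := out = remove_brackets_and_contents_alt doc
instance (doc : String) (out : String) : Decidable (Spec_remove_brackets_and_contents doc out) := by unfold Spec_remove_brackets_and_contents; infer_instance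

-- ===== CLAIM (what is proved, stated in full; the proofs are below) =====
def Claim_equal_remove_brackets_and_contents : Prop := ∀ (doc : String), Dom_remove_brackets_and_contents doc → Spec_remove_brackets_and_contents doc (remove_brackets_and_contents doc)

-- ===== LEMMAS AND PROOFS =====

-- recursive characterisation of A's fold (output part only)
def pvFA : List Char → Int → List Char
  | [], _ => []
  | c :: cs, k =>
    if c = '[' then pvFA cs (k + 1)
    else if c = ']' ∧ k > 0 then pvFA cs (k - 1)
    else if k = 0 then c :: pvFA cs k
    else pvFA cs k

theorem pvFoldA (l : List Char) : ∀ (r : List Char) (k : Int),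
    (l.foldl (fun (st : List Char × Int) i =>
      if i = '[' then (st.1, st.2 + 1)
      else if i = ']' ∧ st.2 > 0 then (st.1, st.2 - 1)
      else if st.2 = 0 then (st.1 ++ [i], st.2)
      else st) (r, k)).1 = r ++ pvFA l k := by
  induction l with
  | nil => intro r k; simp [pvFA]
  | cons c cs ih =>
    intro r k
    simp only [List.foldl_cons, pvFA]
    split_ifs <;> simp [ih]

theorem pvSkipGroup_zero (l : List Char) : pvSkipGroup l 0 = l := by
  cases l <;> simp [pvSkipGroup]

theorem pvFA_pos (l : List Char) : ∀ (d : Int), 0 < d → pvFA l d = pvFA (pvSkipGroup l d) 0 := by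
  induction l with
  | nil => intro d _; simp [pvFA, pvSkipGroup]
  | cons c cs ih =>
    intro d hd
    have hd0 : ¬ d = 0 := by omega
    by_cases h1 : c = '['
    · simp only [pvFA, pvSkipGroup, h1, Char.reduceEq, reduceIte, if_neg hd0]
      exact ih (d + 1) (by omega)
    · by_cases h2 : c = ']'
      · subst h2
        simp only [pvFA, pvSkipGroup, Char.reduceEq, reduceIte, true_and, if_pos hd, if_neg hd0]
        by_cases h3 : d - 1 = 0
        · rw [h3, pvSkipGroup_zero]
        · exact ih (d - 1) (by omega)
      · have hcond : ¬ (c = ']' ∧ d > 0) := by simp [h2]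
        simp only [pvFA, pvSkipGroup, if_neg h1, if_neg h2, if_neg hcond, if_neg hd0]
        exact ih d hd

theorem pvFA_zero : ∀ (l : List Char), pvFA l 0 = pvCopyOutside l := by
  have key : ∀ (n : Nat) (l : List Char), l.length ≤ n → pvFA l 0 = pvCopyOutside l := by
    intro n
    induction n with
    | zero => intro l h; rw [List.length_eq_zero_iff.mp (Nat.le_zero.mp h)]; simp [pvFA, pvCopyOutside]
    | succ n ih =>
      intro l h
      cases l with
      | nil => simp [pvFA, pvCopyOutside]
      | cons c cs =>
        simp only [List.length_cons, Nat.succ_le_succ_iff] at h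
        rw [pvCopyOutside]
        by_cases h1 : c = '['
        · simp only [pvFA, h1, if_true]
          have h01 : (0 : Int) + 1 = 1 := by norm_num
          simp only [h01]
          rw [pvFA_pos cs 1 (by omega)]
          exact ih _ (le_trans (pvSkipGroup_length cs 1) h)
        · have hstep : pvFA (c :: cs) 0 = c :: pvFA cs 0 := by simp [pvFA, h1]
          rw [hstep, ih cs h]
          simp [h1]
  exact fun l => key l.length l le_rfl

-- ===== VERDICT (by name: the statement is the Claim_ definition above) =====
theorem remove_brackets_and_contents_spec : Claim_equal_remove_brackets_and_contents := by
  intro doc _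
  unfold Spec_remove_brackets_and_contents remove_brackets_and_contents remove_brackets_and_contents_alt
  rw [pvFoldA, pvFA_zero]
  rfl
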